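-- pv_equiv track=rewrite | github.com/anqizhou13/mechanosensory_behavior_response | SCRIPTS/behavior.py | find_consecutive_count
-- ===== SOURCE A (Python) =====
-- def find_consecutive_count(lst, target):
--     # start count
--     count = 0
--     # append length of vector in empty list
--     result = []
--
--     for num in lst:
--         if num == target:
--             count += 1
--         else:
--             if count > 0:
--                 result.append(count)
--             # reset
--             count = 0
--
--     if count > 0:
--         result.append(count)
--
--     return result
-- ===== SOURCE B (Python) =====
-- def find_consecutive_count(lst, target):
--     n = len(lst)
--     # boundary detection: a run of target starts where the previous element differs,
--     # and ends where the next element differs; lengths are end - start + 1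
--     starts = [i for i in range(n) if lst[i] == target and (i == 0 or lst[i - 1] != target)]
--     ends = [i for i in range(n) if lst[i] == target and (i == n - 1 or lst[i + 1] != target)]
--     return [e - s + 1 for s, e in zip(starts, ends)]
-- ===== Notes on version B (the rewrite author's own statement) =====
-- stated objective: alternative
-- what changed: Replaces the running-counter-with-reset-and-flush loop by boundary detection: two index scans collect the positions where a run of target starts (previous element differs) and ends (next element differs), and run lengths are obtained by zipping and subtracting.
import Mathlib
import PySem

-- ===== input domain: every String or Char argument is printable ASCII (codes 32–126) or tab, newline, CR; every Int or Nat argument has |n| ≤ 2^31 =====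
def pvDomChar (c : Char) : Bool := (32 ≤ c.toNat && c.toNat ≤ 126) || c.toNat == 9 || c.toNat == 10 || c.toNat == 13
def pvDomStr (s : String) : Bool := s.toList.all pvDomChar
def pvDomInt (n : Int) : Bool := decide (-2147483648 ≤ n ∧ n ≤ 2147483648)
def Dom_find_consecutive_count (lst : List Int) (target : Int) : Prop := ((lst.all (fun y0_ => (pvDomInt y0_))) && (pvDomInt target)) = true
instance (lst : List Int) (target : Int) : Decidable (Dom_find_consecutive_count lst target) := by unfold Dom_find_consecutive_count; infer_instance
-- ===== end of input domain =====

-- B replaces A's running-counter-with-reset-and-flush loop by boundary detection: two index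
-- scans collect the positions where a run of target starts (previous element differs) and ends
-- (next element differs), and the run lengths are obtained by zipping and subtracting.

-- ===== PORT A =====
-- the body of A's for-loop: state = (count, result)
def stepA (target : Int) (st : Int × List Int) (num : Int) : Int × List Int :=
  if num == target then (st.1 + 1, st.2)
  else (0, if st.1 > 0 then st.2 ++ [st.1] else st.2)

def find_consecutive_count (lst : List Int) (target : Int) : List Int :=
  let st := lst.foldl (stepA target) (0, [])
  if st.1 > 0 then st.2 ++ [st.1] else st.2

-- ===== PORT B =====
-- [i for i in range(n) if lst[i] == target and (i == 0 or lst[i-1] != target)]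
-- every index actually read is in range (the i = 0 / i = n-1 disjunct short-circuits in
-- Python before the out-of-range neighbour access), so List.getD is exact here
def startsB (lst : List Int) (target : Int) : List Nat :=
  (List.range lst.length).filter
    (fun i => (lst.getD i 0 == target) && ((i == 0) || !(lst.getD (i - 1) 0 == target)))

-- [i for i in range(n) if lst[i] == target and (i == n - 1 or lst[i+1] != target)]
def endsB (lst : List Int) (target : Int) : List Nat :=
  (List.range lst.length).filter
    (fun i => (lst.getD i 0 == target) && ((i == lst.length - 1) || !(lst.getD (i + 1) 0 == target)))

-- [e - s + 1 for s, e in zip(starts, ends)]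
def find_consecutive_count_alt (lst : List Int) (target : Int) : List Int :=
  ((startsB lst target).zip (endsB lst target)).map (fun p => (p.2 : Int) - (p.1 : Int) + 1)

-- ===== PRECONDITION & SPEC =====
def Spec_find_consecutive_count (lst : List Int) (target : Int) (out : List Int) : Prop := out = find_consecutive_count_alt lst target
instance (lst : List Int) (target : Int) (out : List Int) : Decidable (Spec_find_consecutive_count lst target out) := by unfold Spec_find_consecutive_count; infer_instance

-- ===== CLAIM (what is proved, stated in full; the proofs are below) =====
def Claim_equal_find_consecutive_count : Prop := ∀ (lst : List Int) (target : Int), Dom_find_consecutive_count lst target → Spec_find_consecutive_count lst target (find_consecutive_count lst target)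

-- ===== LEMMAS AND PROOFS =====

-- ---- A-side lemmas (characterising the counter/flush loop) ----

theorem foldA_shift (t : Int) (l : List Int) : ∀ (c : Int) (res : List Int),
    l.foldl (stepA t) (c, res) = ((l.foldl (stepA t) (c, [])).1, res ++ (l.foldl (stepA t) (c, [])).2) := by
  induction l with
  | nil => intro c res; simp
  | cons a as ih =>
    intro c res
    by_cases hat : a = t
    · subst hat; simp only [List.foldl_cons, stepA, BEq.rfl, if_true]; exact ih (c+1) res
    · have hbeq : (a == t) = false := by simp [hat]
      simp only [List.foldl_cons, stepA, hbeq, Bool.false_eq_true, if_false]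
      by_cases hc : c > 0
      · simp only [if_pos hc, List.nil_append]
        rw [ih 0 (res ++ [c]), ih 0 [c]]; simp
      · simp only [if_neg hc]
        exact ih 0 res

def finishA (st : Int × List Int) : List Int := if st.1 > 0 then st.2 ++ [st.1] else st.2

theorem foldA_targets (t : Int) : ∀ (run : List Int), (∀ y ∈ run, y = t) → ∀ (c : Int) (res : List Int),
    run.foldl (stepA t) (c, res) = (c + run.length, res) := by
  intro run
  induction run with
  | nil => intro _ c res; simp
  | cons a as ih =>
    intro h c res
    have ha : a = t := h a (by simp)
    subst ha
    simp only [List.foldl_cons, stepA, BEq.rfl, if_true]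
    rw [ih (fun y hy => h y (by simp [hy])) (c+1) res]
    simp; omega

theorem finishA_flush (t : Int) (rest : List Int) (c : Int) (hc : c > 0)
    (hrest : rest = [] ∨ ∃ y ys, rest = y :: ys ∧ y ≠ t) :
    finishA (rest.foldl (stepA t) (c, [])) = c :: finishA (rest.foldl (stepA t) (0, [])) := by
  rcases hrest with h | ⟨y, ys, rfl, hy⟩
  · subst h; simp [finishA, hc]
  · have hbeq : (y == t) = false := by simp [hy]
    have h1 : stepA t (c, []) y = (0, [c]) := by simp [stepA, hbeq, hc]
    have h2 : stepA t (0, []) y = (0, []) := by simp [stepA, hbeq]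
    rw [List.foldl_cons, List.foldl_cons, h1, h2, foldA_shift t ys 0 [c]]
    simp only [finishA]
    split_ifs <;> simp

-- ---- B-side lemmas (cons/run characterisations of the boundary scans) ----

-- startsB generalised with an explicit "previous element equals target" flag
def startsAux (prev : Bool) (lst : List Int) (t : Int) : List Nat :=
  (List.range lst.length).filter
    (fun i => (lst.getD i 0 == t) && (if i = 0 then !prev else !(lst.getD (i - 1) 0 == t)))

theorem startsB_eq_aux (lst : List Int) (t : Int) : startsB lst t = startsAux false lst t := by
  unfold startsB startsAux
  apply List.filter_congr
  intro i _
  cases i <;> simp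

theorem startsAux_cons (prev : Bool) (x : Int) (xs : List Int) (t : Int) :
    startsAux prev (x :: xs) t
      = (if (x == t) && !prev then [0] else []) ++ (startsAux (x == t) xs t).map (· + 1) := by
  unfold startsAux
  rw [List.length_cons, List.range_succ_eq_map, List.filter_cons, List.filter_map]
  have hpred : ((fun i => ((x :: xs).getD i 0 == t) && (if i = 0 then !prev else !((x :: xs).getD (i - 1) 0 == t))) ∘ Nat.succ)
      = (fun i => (xs.getD i 0 == t) && (if i = 0 then !(x == t) else !(xs.getD (i - 1) 0 == t))) := by
    funext i
    cases i <;> simp [List.getD]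
  rw [hpred]
  have : (Nat.succ = (· + 1 : Nat → Nat)) := by funext i; omega
  rw [this]
  simp only [List.getD]
  simp
  split <;> simp

theorem endsB_cons (x : Int) (xs : List Int) (t : Int) :
    endsB (x :: xs) t
      = (if (x == t) && (match xs with | [] => true | y :: _ => !(y == t)) then [0] else [])
        ++ (endsB xs t).map (· + 1) := by
  unfold endsB
  rw [List.length_cons, List.range_succ_eq_map, List.filter_cons, List.filter_map]
  have hpred : ∀ i ∈ List.range xs.length,
      ((fun i => ((x :: xs).getD i 0 == t) && ((i == xs.length + 1 - 1) || !((x :: xs).getD (i + 1) 0 == t))) ∘ Nat.succ) i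
      = (fun i => (xs.getD i 0 == t) && ((i == xs.length - 1) || !(xs.getD (i + 1) 0 == t))) i := by
    intro i hi
    have hilt : i < xs.length := List.mem_range.mp hi
    have h1 : (i + 1 == xs.length + 1 - 1) = (i == xs.length - 1) := by
      simp only [Nat.add_sub_cancel]
      by_cases h : i = xs.length - 1
      · have : i + 1 = xs.length := by omega
        simp [h]
        omega
      · have : ¬ (i + 1 = xs.length) := by omega
        simp [h, this]
    simp only [Function.comp, List.getD, Nat.succ_eq_add_one]
    rw [h1]
    simp
  rw [List.filter_congr hpred]
  have : (Nat.succ = (· + 1 : Nat → Nat)) := by funext i; omega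
  rw [this]
  cases xs <;> (simp [List.getD]; try (split <;> simp))

-- when the list is empty or starts with a non-target, the prev flag is irrelevant
theorem startsAux_indep (prev : Bool) (xs : List Int) (t : Int)
    (h : xs = [] ∨ ∃ y ys, xs = y :: ys ∧ y ≠ t) :
    startsAux prev xs t = startsB xs t := by
  rw [startsB_eq_aux]
  rcases h with rfl | ⟨y, ys, rfl, hy⟩
  · rfl
  · have hbeq : (y == t) = false := by simp [hy]
    rw [startsAux_cons, startsAux_cons, hbeq]
    simp

-- a run of target elements contributes no start while prev is already true
theorem startsAux_run (t : Int) : ∀ (run : List Int), (∀ y ∈ run, y = t) → ∀ (rest : List Int),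
    startsAux true (run ++ rest) t = (startsAux true rest t).map (· + run.length) := by
  intro run
  induction run with
  | nil => intro _ rest; simp
  | cons a run' ih =>
    intro h rest
    have ha : (a == t) = true := by simp [h a (by simp)]
    rw [List.cons_append, startsAux_cons, ha]
    simp only [Bool.not_true, Bool.and_false, Bool.false_eq_true, if_false, List.nil_append]
    rw [ih (fun y hy => h y (by simp [hy])) rest, List.map_map]
    apply List.map_congr_left
    intro i _
    simp [Function.comp]
    omega

-- a nonempty run of targets followed by a non-target (or nothing) ends exactly at its last index
theorem endsB_run (t : Int) : ∀ (run : List Int), (∀ y ∈ run, y = t) → run ≠ [] →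
    ∀ (rest : List Int), (rest = [] ∨ ∃ y ys, rest = y :: ys ∧ y ≠ t) →
    endsB (run ++ rest) t = (run.length - 1) :: (endsB rest t).map (· + run.length) := by
  intro run
  induction run with
  | nil => intro _ hne; exact absurd rfl hne
  | cons a run' ih =>
    intro h _ rest hrest
    have ha : (a == t) = true := by simp [h a (by simp)]
    match run' with
    | [] =>
      rw [List.cons_append, List.nil_append, endsB_cons, ha]
      rcases hrest with rfl | ⟨y, ys, rfl, hy⟩ <;> simp_all
    | b :: run'' =>
      have hb : (b == t) = true := by simp [h b (by simp)]
      rw [List.cons_append, endsB_cons]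
      have hmatch : (match (b :: run'') ++ rest with | [] => true | y :: _ => !(y == t)) = false := by
        simp [hb]
      rw [hmatch, ha]
      simp only [Bool.and_false]
      rw [ih (fun y hy => h y (by simp [hy])) (by simp) rest hrest]
      simp only [Bool.false_eq_true, if_false, List.nil_append, List.map_cons, List.map_map,
        List.length_cons]
      congr 1

-- shifting both boundary lists by the same amount does not change the differences
theorem alt_shift (s e : List Nat) (k : Nat) :
    (((s.map (· + k)).zip (e.map (· + k))).map (fun p => (p.2 : Int) - (p.1 : Int) + 1))
      = ((s.zip e).map (fun p => (p.2 : Int) - (p.1 : Int) + 1)) := by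
  rw [List.zip_map, List.map_map]
  apply List.map_congr_left
  intro p _
  simp [Prod.map]

-- main equivalence, by strong induction on the length, splitting off the leading run
theorem main_equiv : ∀ (n : Nat) (lst : List Int) (t : Int), lst.length ≤ n →
    find_consecutive_count lst t = find_consecutive_count_alt lst t := by
  intro n
  induction n with
  | zero =>
    intro lst t h
    have : lst = [] := by cases lst <;> simp_all
    subst this
    simp [find_consecutive_count, find_consecutive_count_alt, startsB, endsB]
  | succ n ih =>
    intro lst t h
    match lst with
    | [] => simp [find_consecutive_count, find_consecutive_count_alt, startsB, endsB]
    | x :: xs =>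
      have hxs : xs.length ≤ n := by simpa using h
      by_cases hxt : x = t
      · subst hxt
        have hsplit : xs.takeWhile (x == ·) ++ xs.dropWhile (x == ·) = xs :=
          List.takeWhile_append_dropWhile
        have hrestlen : (xs.dropWhile (x == ·)).length ≤ n := by
          have := List.length_dropWhile_le (x == ·) xs
          omega
        have hrunmem : ∀ y ∈ xs.takeWhile (x == ·), y = x := by
          intro y hy
          have hxy : x = y := by simpa using List.mem_takeWhile_imp hy
          exact hxy.symm
        have hrestshape : xs.dropWhile (x == ·) = [] ∨
            ∃ y ys, xs.dropWhile (x == ·) = y :: ys ∧ y ≠ x := by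
          have hhead := List.head?_dropWhile_not (x == ·) xs
          cases hr : xs.dropWhile (x == ·) with
          | nil => exact Or.inl rfl
          | cons y ys =>
            refine Or.inr ⟨y, ys, rfl, ?_⟩
            rw [hr] at hhead
            simp at hhead
            exact fun he => hhead he.symm
        -- A side: the leading run is flushed as one count
        have hA : find_consecutive_count (x :: xs) x
            = finishA ((xs.takeWhile (x == ·) ++ xs.dropWhile (x == ·)).foldl (stepA x) (1, [])) := by
          unfold find_consecutive_count finishA
          rw [hsplit]
          simp [stepA]
        rw [hA, List.foldl_append, foldA_targets x _ hrunmem 1 []]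
        rw [finishA_flush x (xs.dropWhile (x == ·)) (1 + (xs.takeWhile (x == ·)).length)
              (by omega) hrestshape]
        have hArest : finishA ((xs.dropWhile (x == ·)).foldl (stepA x) (0, []))
            = find_consecutive_count (xs.dropWhile (x == ·)) x := rfl
        rw [hArest, ih _ x hrestlen]
        -- B side: the boundary scans see exactly one start/end pair for the leading run
        have hS : startsB (x :: xs) x
            = 0 :: (startsB (xs.dropWhile (x == ·)) x).map
                (· + ((xs.takeWhile (x == ·)).length + 1)) := by
          rw [startsB_eq_aux,
              show (x :: xs) = x :: (xs.takeWhile (x == ·) ++ xs.dropWhile (x == ·)) from by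
                rw [hsplit],
              startsAux_cons, show (x == x) = true from by simp,
              startsAux_run x _ hrunmem, startsAux_indep true _ x hrestshape]
          simp [List.map_map]
        have hE : endsB (x :: xs) x
            = (xs.takeWhile (x == ·)).length :: (endsB (xs.dropWhile (x == ·)) x).map
                (· + ((xs.takeWhile (x == ·)).length + 1)) := by
          rw [show (x :: xs) = (x :: xs.takeWhile (x == ·)) ++ xs.dropWhile (x == ·) from by
                rw [List.cons_append, hsplit],
              endsB_run x (x :: xs.takeWhile (x == ·))
                (by intro y hy; rcases List.mem_cons.mp hy with rfl | hy'; rfl; exact hrunmem y hy')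
                (by simp) _ hrestshape]
          simp
        unfold find_consecutive_count_alt
        rw [hS, hE, List.zip_cons_cons, List.map_cons, alt_shift]
        congr 1
        simp
        omega
      · have hbeq : (x == t) = false := by simp [hxt]
        have hA : find_consecutive_count (x :: xs) t = find_consecutive_count xs t := by
          unfold find_consecutive_count
          simp [stepA, hbeq]
        have hS : startsB (x :: xs) t = (startsB xs t).map (· + 1) := by
          rw [startsB_eq_aux, startsAux_cons, hbeq, ← startsB_eq_aux]
          simp
        have hE : endsB (x :: xs) t = (endsB xs t).map (· + 1) := by
          rw [endsB_cons, hbeq]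
          simp
        rw [hA, ih xs t hxs]
        unfold find_consecutive_count_alt
        rw [hS, hE, alt_shift]

-- ===== VERDICT (by name: the statement is the Claim_ definition above) =====
theorem find_consecutive_count_spec : Claim_equal_find_consecutive_count := by
  intro lst target _
  unfold Spec_find_consecutive_count
  exact main_equiv lst.length lst target le_rfl
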